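-- pv_equiv track=rewrite | github.com/nyxssmith/jenkinsTests | fontio3/build/lib.linux-x86_64-3.6/fontio3/morx/ligature.py | _explode_validate
-- ===== SOURCE A (Python) =====
-- def _explode_validate(d):
--     lenSet = set(len(obj) for part in (d, d.values()) for obj in part)
--
--     if len(lenSet) != 1:
--         raise ValueError("Inconsistent lengths in GlyphTupleDict!")
--
--     v = [set() for i in range(lenSet.pop())]
--
--     for key in d:
--         for i, glyph in enumerate(key):
--             v[i].add(glyph)
--
--     for obj in d.values():
--         if (obj[0] is None) or any(x is not None for x in obj[1:]):
--             raise ValueError(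
--               "GlyphTupleDict values not in canonical form!")
--
--     return [sorted(s) for s in v]
-- ===== SOURCE B (Python) =====
-- def _explode_validate(d):
--     lenSet = set(len(obj) for part in (d, d.values()) for obj in part)
--
--     if len(lenSet) != 1:
--         raise ValueError("Inconsistent lengths in GlyphTupleDict!")
--
--     n = lenSet.pop()
--
--     for obj in d.values():
--         if (obj[0] is None) or any(x is not None for x in obj[1:]):
--             raise ValueError(
--               "GlyphTupleDict values not in canonical form!")
--
--     pairs = {(i, glyph) for key in d for i, glyph in enumerate(key)}
--     return [sorted(glyph for i, glyph in pairs if i == j) for j in range(n)]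
-- ===== Notes on version B (the rewrite author's own statement) =====
-- stated objective: alternative
-- what changed: Replaces A's pre-sized list of per-column sets filled row-by-row (and sorted at the end) with one flat set of (column, glyph) pairs built in a single comprehension, from which each column is then extracted by filtering on the column index and sorting; validation checks are kept in the same order so all ValueErrors fire identically.
import Mathlib
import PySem

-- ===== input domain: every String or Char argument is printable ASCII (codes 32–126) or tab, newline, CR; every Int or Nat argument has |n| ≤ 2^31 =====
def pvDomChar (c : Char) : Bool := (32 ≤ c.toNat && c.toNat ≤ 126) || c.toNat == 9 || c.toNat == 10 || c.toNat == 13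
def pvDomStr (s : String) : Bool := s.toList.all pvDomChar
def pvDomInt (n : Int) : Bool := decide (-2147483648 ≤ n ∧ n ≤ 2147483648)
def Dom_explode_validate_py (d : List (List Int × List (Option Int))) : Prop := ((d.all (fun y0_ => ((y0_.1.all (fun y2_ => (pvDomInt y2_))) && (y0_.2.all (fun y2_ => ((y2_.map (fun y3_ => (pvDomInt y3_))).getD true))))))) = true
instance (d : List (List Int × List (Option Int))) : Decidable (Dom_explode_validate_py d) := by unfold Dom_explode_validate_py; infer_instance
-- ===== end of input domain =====

-- B replaces A's pre-sized list of per-column sets filled row by row (and sorted at the end)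
-- with ONE flat set of (column, glyph) pairs; each output column is then obtained by filtering
-- that pair set on the column index and sorting (sorted(...) makes the result independent of
-- the Python set's iteration order, so the port's insertion-order traversal is exact for the
-- returned value); the validation checks are kept in the same order so exceptions fire identically.

-- ===== PORT A =====
-- inner loop 'for i, glyph in enumerate(key): v[i].add(glyph)'
def pvAddKey (v : List (PySem.Set Int)) (i : Nat) (k : List Int) : List (PySem.Set Int) :=
  match k with
  | [] => v
  | g :: gs => pvAddKey (v.modify i (fun s => PySem.Set.add s g)) (i + 1) gs

def explode_validate_py (d : List (List Int × List (Option Int))) : List (List Int) :=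
  let lenSet : PySem.Set Int :=
    PySem.Set.ofList (d.map (fun p => (p.1.length : Int)) ++ d.map (fun p => (p.2.length : Int)))
  if PySem.Set.len lenSet ≠ 1 then []  -- raise ValueError (inconsistent lengths)
  else
    let n : Nat := (lenSet.headD 0).toNat  -- lenSet.pop() on the singleton set
    let v : List (PySem.Set Int) :=
      d.foldl (fun v p => pvAddKey v 0 p.1) (List.replicate n PySem.Set.empty)
    -- 'for obj in d.values(): if obj[0] is None or any(...): raise'
    if d.any (fun p => ((PySem.List.pyGet? p.2 0).getD none).isNone || (p.2.drop 1).any (fun x => x.isSome))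
    then []  -- raise (IndexError on obj[0] if empty, else ValueError: not canonical)
    else v.map (fun s => PySem.List.sorted s (fun x => x) false)

-- ===== PORT B =====
def explode_validate_py_alt (d : List (List Int × List (Option Int))) : List (List Int) :=
  let lenSet : PySem.Set Int :=
    PySem.Set.ofList (d.map (fun p => (p.1.length : Int)) ++ d.map (fun p => (p.2.length : Int)))
  if PySem.Set.len lenSet ≠ 1 then []  -- raise ValueError (inconsistent lengths)
  else
    let n : Nat := (lenSet.headD 0).toNat  -- n = lenSet.pop()
    if d.any (fun p => ((PySem.List.pyGet? p.2 0).getD none).isNone || (p.2.drop 1).any (fun x => x.isSome))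
    then []  -- raise (IndexError / ValueError: not canonical)
    else
      -- pairs = {(i, glyph) for key in d for i, glyph in enumerate(key)}
      let pairs : PySem.Set (Int × Int) :=
        PySem.Set.ofList (d.flatMap (fun p => PySem.List.enumerate p.1 0))
      -- [sorted(glyph for i, glyph in pairs if i == j) for j in range(n)]
      (PySem.List.pyRange 0 (n : Int)).map (fun j =>
        PySem.List.sorted ((pairs.filter (fun q => q.1 == j)).map Prod.snd) (fun x => x) false)

-- ===== PRECONDITION & SPEC =====
-- Pre_ excludes exactly the inputs where A raises: empty dict or inconsistent lengths or
-- zero-length tuples (ValueError / IndexError on obj[0]) or values not in canonical form.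
def Pre_explode_validate_py (d : List (List Int × List (Option Int))) : Prop :=
  d ≠ [] ∧
  (d.headD ([], [])).1.length ≠ 0 ∧
  (∀ p ∈ d, p.1.length = (d.headD ([], [])).1.length ∧ p.2.length = (d.headD ([], [])).1.length) ∧
  (∀ p ∈ d, (p.2.headD none).isSome ∧ ∀ x ∈ p.2.tail, x = none)
instance (d : List (List Int × List (Option Int))) : Decidable (Pre_explode_validate_py d) := by
  unfold Pre_explode_validate_py; infer_instance

def pvWitness_explode_validate_py : (List (List Int × List (Option Int))) :=
  [([1, 2], [some 5, none]), ([3, 1], [some 7, none])]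

def Spec_explode_validate_py (d : List (List Int × List (Option Int))) (out : List (List Int)) : Prop := out = explode_validate_py_alt d
instance (d : List (List Int × List (Option Int))) (out : List (List Int)) : Decidable (Spec_explode_validate_py d out) := by unfold Spec_explode_validate_py; infer_instance

-- ===== CLAIM (what is proved, stated in full; the proofs are below) =====
def Claim_equal_explode_validate_py : Prop := ∀ (d : List (List Int × List (Option Int))), Dom_explode_validate_py d → Pre_explode_validate_py d → Spec_explode_validate_py d (explode_validate_py d)

-- ===== LEMMAS AND PROOFS =====

theorem pv_foldl_add_const (a : Int) (xs : List Int) (h : ∀ x ∈ xs, x = a) :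
    List.foldl PySem.Set.add [a] xs = [a] := by
  induction xs with
  | nil => rfl
  | cons x t ih =>
      have hx : x = a := h x (by simp)
      subst hx
      have : PySem.Set.add [x] x = [x] := by simp [PySem.Set.add, PySem.Set.contains]
      simp only [List.foldl_cons, this]
      exact ih (fun y hy => h y (by simp [hy]))

theorem pv_ofList_const (a : Int) (xs : List Int) (hne : xs ≠ []) (h : ∀ x ∈ xs, x = a) :
    PySem.Set.ofList xs = [a] := by
  cases xs with
  | nil => exact absurd rfl hne
  | cons x t =>
      have hx : x = a := h x (by simp)
      subst hx
      have h0 : PySem.Set.ofList (x :: t) = List.foldl PySem.Set.add [x] t := by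
        simp [PySem.Set.ofList_eq_foldl, PySem.Set.add]
      rw [h0]
      exact pv_foldl_add_const x t (fun y hy => h y (by simp [hy]))

theorem pvAddKey_eq (k : List Int) : ∀ (v : List (PySem.Set Int)) (i : Nat),
    i + k.length = v.length →
    pvAddKey v i k = v.take i ++ List.zipWith (fun s g => PySem.Set.add s g) (v.drop i) k := by
  induction k with
  | nil =>
      intro v i hl
      simp at hl
      simp [pvAddKey, hl]
  | cons g gs ih =>
      intro v i hl
      have hi : i < v.length := by simp at hl; omega
      rw [show pvAddKey v i (g :: gs) = pvAddKey (v.modify i (fun s => PySem.Set.add s g)) (i+1) gs from rfl]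
      rw [ih _ (i+1) (by simp at hl ⊢; omega)]
      have h1 : List.take (i+1) (v.modify i (fun s => PySem.Set.add s g)) =
          List.take i v ++ [PySem.Set.add v[i] g] := by
        rw [List.modify_eq_take_cons_drop hi, List.take_append]
        simp [List.length_take, Nat.min_eq_left hi.le, List.take_take]
      have h2 : List.drop (i+1) (v.modify i (fun s => PySem.Set.add s g)) = List.drop (i+1) v :=
        List.drop_modify_of_lt _ i (i+1) v (Nat.lt_succ_self i)
      rw [h1, h2, List.drop_eq_getElem_cons hi, List.zipWith_cons_cons]
      simp

theorem pvFold_length (ks : List (List Int)) : ∀ (v : List (PySem.Set Int)),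
    (∀ k ∈ ks, k.length = v.length) →
    (ks.foldl (fun v k => pvAddKey v 0 k) v).length = v.length := by
  induction ks with
  | nil => intro v _; rfl
  | cons k ks ih =>
      intro v hv
      have hk : k.length = v.length := hv k (by simp)
      have h1 : pvAddKey v 0 k = List.zipWith (fun s g => PySem.Set.add s g) v k := by
        simpa using pvAddKey_eq k v 0 (by simp [hk])
      have hlen : (List.zipWith (fun s g => PySem.Set.add s g) v k).length = v.length := by
        simp [List.length_zipWith, hk]
      simp only [List.foldl_cons, h1]
      rw [ih _ (by intro k' hk'; rw [hlen]; exact hv k' (by simp [hk']))]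
      exact hlen

theorem pvFold_getD (ks : List (List Int)) : ∀ (v : List (PySem.Set Int)) (j : Nat),
    (∀ k ∈ ks, k.length = v.length) → j < v.length →
    (ks.foldl (fun v k => pvAddKey v 0 k) v).getD j PySem.Set.empty =
      List.foldl PySem.Set.add (v.getD j PySem.Set.empty) (ks.map (fun k => k.getD j 0)) := by
  induction ks with
  | nil => intro v j _ _; rfl
  | cons k ks ih =>
      intro v j hv hj
      have hk : k.length = v.length := hv k (by simp)
      have h1 : pvAddKey v 0 k = List.zipWith (fun s g => PySem.Set.add s g) v k := by
        simpa using pvAddKey_eq k v 0 (by simp [hk])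
      have hlen : (List.zipWith (fun s g => PySem.Set.add s g) v k).length = v.length := by
        simp [List.length_zipWith, hk]
      simp only [List.foldl_cons, List.map_cons, h1]
      rw [ih _ j (by intro k' hk'; rw [hlen]; exact hv k' (by simp [hk'])) (by omega)]
      have hjz : j < (List.zipWith (fun s g => PySem.Set.add s g) v k).length := by omega
      have hgd : (List.zipWith (fun s g => PySem.Set.add s g) v k).getD j PySem.Set.empty =
          PySem.Set.add (v.getD j PySem.Set.empty) (k.getD j 0) := by
        rw [List.getD_eq_getElem _ _ hjz, List.getElem_zipWith,
            List.getD_eq_getElem _ _ hj, List.getD_eq_getElem _ _ (by omega)]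
      rw [hgd]

-- per column j: A's set of column-j glyphs sorts to the same list as B's filtered pair set
theorem pvColumn_eq (d : List (List Int × List (Option Int))) (n0 : Nat) (j : Nat)
    (hj : j < n0) (hlen : ∀ p ∈ d, p.1.length = n0) :
    PySem.List.sorted (PySem.Set.ofList ((d.map (fun p => p.1)).map (fun k => k.getD j 0))) (fun x => x) false =
    PySem.List.sorted
      (((PySem.Set.ofList (d.flatMap (fun p => PySem.List.enumerate p.1 0))).filter
          (fun q => q.1 == ((j : Nat) : Int))).map Prod.snd) (fun x => x) false := by
  apply (PySem.List.sorted_id_eq_sorted_id_iff_perm _ _).mpr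
  have hnd1 : (PySem.Set.ofList ((d.map (fun p => p.1)).map (fun k => k.getD j 0))).Nodup :=
    PySem.Set.nodup_ofList _
  have hndp : (PySem.Set.ofList (d.flatMap (fun p => PySem.List.enumerate p.1 0))).Nodup :=
    PySem.Set.nodup_ofList _
  have hndf := hndp.filter (fun q => q.1 == ((j : Nat) : Int))
  have hnd2 : ((((PySem.Set.ofList (d.flatMap (fun p => PySem.List.enumerate p.1 0)))).filter
      (fun q => q.1 == ((j : Nat) : Int))).map Prod.snd).Nodup := by
    apply List.Nodup.map_on _ hndf
    intro x hx y hy hxy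
    have hx1 : x.1 = ((j : Nat) : Int) := by
      have := List.of_mem_filter hx; simpa using this
    have hy1 : y.1 = ((j : Nat) : Int) := by
      have := List.of_mem_filter hy; simpa using this
    exact Prod.ext (hx1.trans hy1.symm) hxy
  apply (List.perm_ext_iff_of_nodup hnd1 hnd2).mpr
  intro g
  rw [PySem.Set.mem_ofList]
  constructor
  · intro hg
    simp only [List.map_map, List.mem_map] at hg
    obtain ⟨p, hp, hpg⟩ := hg
    have hlp : p.1.length = n0 := hlen p hp
    have hget : p.1.getD j 0 = p.1[j]'(by omega) := List.getD_eq_getElem _ _ (by omega)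
    refine List.mem_map.mpr ⟨(((j : Nat) : Int), g), ?_, rfl⟩
    apply List.mem_filter.mpr
    refine ⟨?_, by simp⟩
    rw [PySem.Set.mem_ofList]
    apply List.mem_flatMap.mpr
    refine ⟨p, hp, ?_⟩
    rw [PySem.List.mem_enumerate_iff]
    refine ⟨j, by omega, ?_⟩
    simp [← hpg]
    rw [List.getElem?_eq_getElem (by omega)]
    rfl
  · intro hg
    obtain ⟨q, hq, hq2⟩ := List.mem_map.mp hg
    have hq1 : q.1 = ((j : Nat) : Int) := by
      have := List.of_mem_filter hq; simpa using this
    have hqmem : q ∈ PySem.Set.ofList (d.flatMap (fun p => PySem.List.enumerate p.1 0)) :=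
      List.mem_of_mem_filter hq
    rw [PySem.Set.mem_ofList] at hqmem
    obtain ⟨p, hp, hqe⟩ := List.mem_flatMap.mp hqmem
    rw [PySem.List.mem_enumerate_iff] at hqe
    obtain ⟨k, hk, hqk⟩ := hqe
    have hkj : k = j := by
      have : q.1 = (0 : Int) + (k : Int) := by rw [hqk]
      rw [hq1] at this
      omega
    subst hkj
    have hlp : p.1.length = n0 := hlen p hp
    simp only [List.map_map, List.mem_map]
    refine ⟨p, hp, ?_⟩
    have hget : p.1.getD k 0 = p.1[k]'hk := List.getD_eq_getElem _ _ hk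
    rw [Function.comp_apply] at *
    rw [hget, ← hq2, hqk]

theorem main_eq (d : List (List Int × List (Option Int))) (hpre : Pre_explode_validate_py d) :
    explode_validate_py d = explode_validate_py_alt d := by
  obtain ⟨hne, hn0, hlen, hcanon⟩ := hpre
  set n0 : Nat := (d.headD ([], [])).1.length with hn0def
  -- the singleton length set
  have hL : PySem.Set.ofList
      (d.map (fun p => (p.1.length : Int)) ++ d.map (fun p => (p.2.length : Int))) = [(n0 : Int)] := by
    apply pv_ofList_const
    · cases d with
      | nil => exact absurd rfl hne
      | cons a t => simp
    · intro x hx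
      rcases List.mem_append.mp hx with h | h <;>
        · obtain ⟨p, hp, rfl⟩ := List.mem_map.mp h
          have := hlen p hp
          omega
  have hone : ¬ (PySem.Set.len [(n0 : Int)] ≠ 1) := by simp [PySem.Set.len]
  -- the canonical-form check is false
  have hcan : d.any (fun p => ((PySem.List.pyGet? p.2 0).getD none).isNone
      || (p.2.drop 1).any (fun x => x.isSome)) = false := by
    apply List.any_eq_false.mpr
    intro p hp
    obtain ⟨h1, h2⟩ := hcanon p hp
    have hl2 := (hlen p hp).2
    cases hv : p.2 with
    | nil => rw [hv] at hl2; simp at hl2; omega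
    | cons y ys =>
        rw [hv] at h1 h2
        simp only [List.headD_cons] at h1
        simp only [List.tail_cons] at h2
        obtain ⟨a, rfl⟩ := Option.isSome_iff_exists.mp h1
        simp only [PySem.List.pyGet?, PySem.List.pyIdx?]
        simp
        intro x hx
        exact h2 x hx
  -- key lengths
  have hks : ∀ k ∈ d.map (fun p => p.1), k.length = n0 := by
    intro k hk
    obtain ⟨p, hp, rfl⟩ := List.mem_map.mp hk
    exact (hlen p hp).1
  -- unfold both ports
  rw [explode_validate_py, explode_validate_py_alt]
  simp only [hL, if_neg hone, hcan, Bool.false_eq_true, if_false]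
  -- n computed from the singleton set
  have hn : (([(n0 : Int)] : PySem.Set Int).headD 0).toNat = n0 := by simp
  rw [hn, PySem.List.pyRange_zero_natCast n0]
  -- A's accumulator fold, re-indexed over the keys only
  have hfold : d.foldl (fun v p => pvAddKey v 0 p.1) (List.replicate n0 PySem.Set.empty) =
      (d.map (fun p => p.1)).foldl (fun v k => pvAddKey v 0 k) (List.replicate n0 PySem.Set.empty) := by
    rw [List.foldl_map]
  rw [hfold]
  set ks := d.map (fun p => p.1) with hksdef
  have hks' : ∀ k ∈ ks, k.length = (List.replicate n0 (PySem.Set.empty : PySem.Set Int)).length := by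
    simpa using hks
  apply List.ext_getElem
  · simp only [List.length_map]
    rw [pvFold_length ks _ hks']
    simp
  · intro j h1 h2
    simp only [List.getElem_map]
    have hj : j < n0 := by
      have := pvFold_length ks _ hks'
      simp at this h1
      omega
    have hget := pvFold_getD ks (List.replicate n0 PySem.Set.empty) j hks' (by simpa using hj)
    have hgd : (ks.foldl (fun v k => pvAddKey v 0 k) (List.replicate n0 PySem.Set.empty)).getD j
        PySem.Set.empty = (ks.foldl (fun v k => pvAddKey v 0 k) (List.replicate n0 PySem.Set.empty))[j]'(by
          rw [pvFold_length ks _ hks']; simpa using hj) := by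
      rw [List.getD_eq_getElem]
    have hrep : (List.replicate n0 (PySem.Set.empty : PySem.Set Int)).getD j PySem.Set.empty =
        PySem.Set.empty := by
      rw [List.getD_eq_getElem _ _ (by simpa using hj)]
      simp
    rw [hrep] at hget
    have hrange : (List.range n0)[j]'(by simpa using hj) = j := List.getElem_range _
    have hA : (ks.foldl (fun v k => pvAddKey v 0 k) (List.replicate n0 PySem.Set.empty))[j]'(by
          rw [pvFold_length ks _ hks']; simpa using hj) =
        PySem.Set.ofList (ks.map (fun k => k.getD j 0)) := by
      rw [← hgd, hget, PySem.Set.ofList_eq_foldl]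
      rfl
    rw [hA, hrange]
    exact pvColumn_eq d n0 j hj (fun p hp => (hlen p hp).1)

-- ===== VERDICT (by name: the statement is the Claim_ definition above) =====
theorem explode_validate_py_spec : Claim_equal_explode_validate_py := by
  intro d _ hpre
  unfold Spec_explode_validate_py
  exact main_eq d hpre
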